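-- pv_equiv track=rewrite | github.com/redcholove/interview_preparing | 42_trapping_rain_water.py | getRightHeight
-- ===== SOURCE A (Python) =====
-- def getRightHeight(height):
-- 	hLen = len(height)
-- 	rightHeight = [0 for _ in range(hLen)]
-- 	for i in range(hLen-1, -1, -1):
-- 		if i == hLen - 1:
-- 			rightHeight[i] = height[i]
-- 		else:
-- 			rightHeight[i] = max(height[i], rightHeight[i+1])
-- 	return rightHeight
-- ===== SOURCE B (Python) =====
-- def getRightHeight(height):
-- 	return [max(height[i:]) for i in range(len(height))]
-- ===== Notes on version B (the rewrite author's own statement) =====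
-- stated objective: simpler
-- what changed: Replaces the backward index loop that accumulates a running maximum into a preallocated mutable array with a one-line comprehension that recomputes each suffix maximum directly via max(height[i:]).
import Mathlib
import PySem

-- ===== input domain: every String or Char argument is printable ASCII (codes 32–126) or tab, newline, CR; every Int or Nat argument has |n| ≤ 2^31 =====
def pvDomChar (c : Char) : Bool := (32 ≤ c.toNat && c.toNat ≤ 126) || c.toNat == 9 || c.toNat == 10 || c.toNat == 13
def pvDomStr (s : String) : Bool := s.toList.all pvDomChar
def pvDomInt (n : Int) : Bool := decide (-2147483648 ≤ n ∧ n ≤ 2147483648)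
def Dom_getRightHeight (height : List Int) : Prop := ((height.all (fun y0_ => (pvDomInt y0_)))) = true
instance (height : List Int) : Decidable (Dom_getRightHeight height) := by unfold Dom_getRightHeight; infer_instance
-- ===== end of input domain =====

-- B replaces A's backward accumulating pass over a preallocated array with a direct
-- per-index suffix-maximum comprehension (simpler to read; not faster).

-- ===== PORT A =====
-- literal transliteration of A: zero-filled array, then a backward index loop;
-- all indices touched are provably in range, so pyGetD's default 0 is never read.
def getRightHeight (height : List Int) : List Int :=
  let hLen : Int := (height.length : Int)
  let rightHeight : List Int := List.replicate height.length 0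
  (PySem.List.pyRange (hLen - 1) (-1) (-1)).foldl
    (fun rh i =>
      if i = hLen - 1 then rh.set i.toNat (PySem.List.pyGetD height i 0)
      else rh.set i.toNat (max (PySem.List.pyGetD height i 0) (PySem.List.pyGetD rh (i + 1) 0)))
    rightHeight

-- ===== PORT B =====
-- literal transliteration of B: [max(height[i:]) for i in range(len(height))];
-- each slice is nonempty (i < len), so max?'s .getD 0 default is never read.
def getRightHeight_alt (height : List Int) : List Int :=
  (PySem.List.pyRange 0 (height.length : Int)).map
    (fun i => (PySem.List.max? (PySem.List.slice height (some i) none) id).getD 0)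

-- ===== PRECONDITION & SPEC =====
def Spec_getRightHeight (height : List Int) (out : List Int) : Prop := out = getRightHeight_alt height
instance (height : List Int) (out : List Int) : Decidable (Spec_getRightHeight height out) := by unfold Spec_getRightHeight; infer_instance

-- ===== CLAIM (what is proved, stated in full; the proofs are below) =====
def Claim_equal_getRightHeight : Prop := ∀ (height : List Int), Dom_getRightHeight height → Spec_getRightHeight height (getRightHeight height)

-- ===== LEMMAS AND PROOFS =====

-- the suffix maximum of height from position i (0 for an empty suffix)
def pvSfx (height : List Int) (i : Nat) : Int :=
  match height.drop i with
  | [] => 0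
  | x :: xs => xs.foldl max x

lemma pvSfx_last (height : List Int) (h : height ≠ []) :
    pvSfx height (height.length - 1) = height.getD (height.length - 1) 0 := by
  have hlt : height.length - 1 < height.length := by
    cases height with
    | nil => simp at h
    | cons a l => simp
  have hdrop : height.drop (height.length - 1) = [height.getD (height.length - 1) 0] := by
    have := List.drop_length_sub_one (l := height) h
    rw [this]
    have : height.getLast h = height.getD (height.length - 1) 0 := by
      rw [List.getLast_eq_getElem, List.getD_eq_getElem height 0 hlt]
    rw [this]
  simp [pvSfx, hdrop]

lemma pvSfx_rec (height : List Int) (i : Nat) (h : i + 1 < height.length) :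
    pvSfx height i = max (height.getD i 0) (pvSfx height (i + 1)) := by
  have hi : i < height.length := by omega
  have hdrop : height.drop i = height.getD i 0 :: height.drop (i + 1) := by
    rw [List.getD_eq_getElem height 0 hi]
    exact (List.drop_eq_getElem_cons hi)
  match hsuf : height.drop (i + 1) with
  | [] =>
    exfalso
    have := List.length_drop (i := i + 1) (l := height)
    rw [hsuf] at this
    simp at this
    omega
  | y :: ys =>
    simp only [pvSfx, hdrop, hsuf, List.foldl_cons]
    have : ∀ (l : List Int) (a b : Int), List.foldl max (max a b) l = max a (List.foldl max b l) := by
      intro l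
      induction l with
      | nil => intro a b; simp
      | cons c l ih =>
        intro a b
        simp only [List.foldl_cons, max_assoc, ih]
    exact this ys _ _

-- B's inner max: max? of a nonempty list of ints computes the foldl-max value
lemma pvMaxSome (xs : List Int) (m : Int) :
    PySem.List.max? (m :: xs) (id : Int → Int) = some (xs.foldl max m) := by
  induction xs generalizing m with
  | nil => rfl
  | cons x xs ih =>
    have hstep : PySem.List.max? (m :: x :: xs) (id : Int → Int)
        = PySem.List.max? (max m x :: xs) (id : Int → Int) := by
      simp only [PySem.List.max?, List.foldl_cons, id]
      congr 1
      rcases lt_or_ge m x with h | h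
      · simp [if_pos h, max_eq_right (le_of_lt h)]
      · simp [if_neg (not_lt.mpr h), max_eq_left h]
    rw [hstep, ih, List.foldl_cons]

-- B elementwise: entry i is the suffix maximum
lemma pvAlt_eq (height : List Int) :
    getRightHeight_alt height = (List.range height.length).map (pvSfx height) := by
  unfold getRightHeight_alt
  rw [PySem.List.pyRange_zero_natCast, List.map_map]
  apply List.map_congr_left
  intro k hk
  rw [List.mem_range] at hk
  simp only [Function.comp]
  rw [PySem.List.slice_from height (by positivity : (0:Int) ≤ (k:Int))]
  have hdrop : height.drop ((k : Int).toNat) = height.drop k := by norm_num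
  rw [hdrop]
  have hne : height.drop k ≠ [] := by
    intro hnil
    have := List.length_drop (i := k) (l := height)
    rw [hnil] at this; simp at this; omega
  match hd : height.drop k with
  | [] => exact absurd hd hne
  | x :: xs =>
    rw [pvMaxSome, Option.getD_some]
    simp [pvSfx, hd]

-- the descending index list A iterates over, as a reversed range
lemma pvRange_desc_map (n : Nat) :
    PySem.List.pyRange ((n : Int) - 1) (-1) (-1)
      = (List.range n).map (fun (k : Nat) => ((n : Int) - 1 - (k : Int))) := by
  rcases Nat.eq_zero_or_pos n with h | h
  · subst h; rfl
  · simp only [PySem.List.pyRange]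
    rw [if_neg (by norm_num : (-1 : Int) ≠ 0)]
    have hlt : ¬ (0 : Int) < -1 := by norm_num
    rw [if_neg hlt]
    have hlt2 : (-1 : Int) < (n : Int) - 1 := by omega
    rw [if_pos hlt2]
    have hc : (((n : Int) - 1 - -1 + - -1 - 1) / -(-1)) = (n : Int) := by
      norm_num
    rw [hc]
    have hcn : ((n : Int)).toNat = n := by simp
    rw [hcn]
    apply List.map_congr_left
    intro k _
    ring

lemma pvRev_map (n : Nat) :
    (List.range n).map (fun (k : Nat) => ((n : Int) - 1 - (k : Int)))
      = (List.range n).reverse.map (fun (k : Nat) => (k : Int)) := by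
  induction n with
  | zero => simp
  | succ m ih =>
    conv_lhs => rw [List.range_succ_eq_map]
    conv_rhs => rw [List.range_succ]
    simp only [List.map_cons, List.map_map, List.reverse_append, List.reverse_cons,
      List.reverse_nil, List.nil_append, List.singleton_append]
    congr 1
    · push_cast; ring
    · rw [← ih]
      apply List.map_congr_left
      intro k hk
      simp only [Function.comp]
      push_cast
      ring

-- the loop body of A, at a Nat index
lemma pvStep_loop (height : List Int) (n : Nat) (hn : n = height.length) :
    ∀ (k : Nat) (rh : List Int), k ≤ n → rh.length = n →
      (∀ i, k ≤ i → i < n → rh.getD i 0 = pvSfx height i) →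
      (List.foldr
        (fun (j : Nat) (rh : List Int) =>
          if (j : Int) = (n : Int) - 1 then rh.set ((j : Int)).toNat (PySem.List.pyGetD height (j : Int) 0)
          else rh.set ((j : Int)).toNat
            (max (PySem.List.pyGetD height (j : Int) 0) (PySem.List.pyGetD rh ((j : Int) + 1) 0)))
        rh (List.range k)).length = n ∧
      (∀ i, i < n →
        (List.foldr
          (fun (j : Nat) (rh : List Int) =>
            if (j : Int) = (n : Int) - 1 then rh.set ((j : Int)).toNat (PySem.List.pyGetD height (j : Int) 0)
            else rh.set ((j : Int)).toNat
              (max (PySem.List.pyGetD height (j : Int) 0) (PySem.List.pyGetD rh ((j : Int) + 1) 0)))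
          rh (List.range k)).getD i 0 = pvSfx height i) := by
  intro k
  induction k with
  | zero =>
    intro rh _ hlen hcorr
    refine ⟨by simpa using hlen, ?_⟩
    intro i hi
    simpa using hcorr i (Nat.zero_le i) hi
  | succ m ih =>
    intro rh hk hlen hcorr
    rw [List.range_succ, List.foldr_append]
    set rh' := (if ((m : Nat) : Int) = (n : Int) - 1 then
        rh.set ((m : Int)).toNat (PySem.List.pyGetD height (m : Int) 0)
      else rh.set ((m : Int)).toNat
        (max (PySem.List.pyGetD height (m : Int) 0) (PySem.List.pyGetD rh ((m : Int) + 1) 0)))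
      with hrh'
    simp only [List.foldr_cons, List.foldr_nil] at *
    have hm : m < n := by omega
    have hmlen : m < rh.length := by omega
    have htn : ((m : Int)).toNat = m := by simp
    have hlen' : rh'.length = n := by
      rw [hrh']; split_ifs <;> simp [hlen]
    have hgetset_eq : ∀ v : Int, (rh.set m v).getD m 0 = v := by
      intro v
      simp [List.getD, List.getElem?_set_self hmlen]
    have hgetset_ne : ∀ (v : Int) (i : Nat), i ≠ m → (rh.set m v).getD i 0 = rh.getD i 0 := by
      intro v i hne
      simp [List.getD, List.getElem?_set_ne (Ne.symm hne)]
    have hcorr' : ∀ i, m ≤ i → i < n → rh'.getD i 0 = pvSfx height i := by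
      intro i him hin
      rcases eq_or_lt_of_le him with heq | hgt
      · -- i = m: the freshly written cell
        subst heq
        rw [hrh']
        split_ifs with hbr
        · -- m = n - 1 : last index
          rw [htn, hgetset_eq]
          have hm' : m = height.length - 1 := by omega
          rw [PySem.List.pyGetD_natCast, hm', pvSfx_last height (by intro hnil; rw [hnil] at hn; simp at hn; omega)]
        · -- m < n - 1
          have hm1 : m + 1 < n := by
            rcases Nat.lt_or_ge (m+1) n with h | h
            · exact h
            · exfalso; apply hbr; omega
          rw [htn, hgetset_eq]
          have hcast : ((m : Int) + 1) = ((m + 1 : Nat) : Int) := by push_cast; ring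
          rw [hcast, PySem.List.pyGetD_natCast, PySem.List.pyGetD_natCast,
            hcorr (m+1) (by omega) (by omega), pvSfx_rec height m (by omega)]
      · -- i > m: untouched
        have : rh'.getD i 0 = rh.getD i 0 := by
          rw [hrh']; split_ifs <;> (rw [htn]; exact hgetset_ne _ i (by omega))
        rw [this]
        exact hcorr i (by omega) hin
    exact ih rh' (by omega) hlen' hcorr'

-- A as the suffix-maximum table
lemma pvA_eq (height : List Int) :
    getRightHeight height = (List.range height.length).map (pvSfx height) := by
  have hA : getRightHeight height
      = (PySem.List.pyRange ((height.length : Int) - 1) (-1) (-1)).foldl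
          (fun rh i =>
            if i = (height.length : Int) - 1 then rh.set i.toNat (PySem.List.pyGetD height i 0)
            else rh.set i.toNat
              (max (PySem.List.pyGetD height i 0) (PySem.List.pyGetD rh (i + 1) 0)))
          (List.replicate height.length 0) := rfl
  rw [hA, pvRange_desc_map, pvRev_map, List.map_reverse, List.foldl_reverse, List.foldr_map]
  obtain ⟨hlen, helem⟩ := pvStep_loop height height.length rfl height.length
    (List.replicate height.length 0) (le_refl _) (by simp)
    (by intro i h1 h2; omega)
  apply List.ext_getElem
  · simpa using hlen
  · intro i h1 h2
    rw [List.getElem_map]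
    have hi : i < height.length := by simpa using h2
    have := helem i hi
    rw [List.getD_eq_getElem _ 0 (by omega)] at this
    simpa [List.getElem_range] using this

-- ===== VERDICT (by name: the statement is the Claim_ definition above) =====
theorem getRightHeight_spec : Claim_equal_getRightHeight := by
  intro height _
  show getRightHeight height = getRightHeight_alt height
  rw [pvA_eq, pvAlt_eq]
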